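-- pv_equiv track=rewrite | github.com/sunnuls/TPb | coach_app/engine/blackjack/hand.py | _is_soft
-- ===== SOURCE A (Python) =====
-- def _rank(token: str) -> str:
--     return str(token)[0].upper()
--
-- def _value(rank: str) -> int:
--     if rank in ("T", "J", "Q", "K"):
--         return 10
--     if rank == "A":
--         return 11
--     try:
--         return int(rank)
--     except Exception:
--         return 0
--
-- def _is_soft(hand_cards: list[str]) -> bool:
--     # Soft if at least one Ace can be counted as 11 without busting.
--     ranks = [_rank(c) for c in hand_cards]
--     non_ace_total = sum(_value(r) for r in ranks if r != "A")
--     ace_count = sum(1 for r in ranks if r == "A")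
--     if ace_count == 0:
--         return False
--
--     # Count one Ace as 11 and others as 1.
--     total = non_ace_total + 11 + (ace_count - 1)
--     return total <= 21
-- ===== SOURCE B (Python) =====
-- def _is_soft(hand_cards: list[str]) -> bool:
--     # Single pass: count every ace as 11, then downgrade aces while busting;
--     # soft iff at least one ace is still worth 11 afterwards.
--     total = 0
--     aces_as_eleven = 0
--     for c in hand_cards:
--         r = str(c)[0].upper()
--         if r == "A":
--             total += 11
--             aces_as_eleven += 1
--         elif r in ("T", "J", "Q", "K"):
--             total += 10
--         else:
--             try:
--                 total += int(r)
--             except Exception: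
--                 pass
--     while total > 21 and aces_as_eleven > 0:
--         total -= 10
--         aces_as_eleven -= 1
--     return aces_as_eleven >= 1
-- ===== Notes on version B (the rewrite author's own statement) =====
-- stated objective: alternative
-- what changed: Replaces A's three list passes plus closed-form ace arithmetic with a single accumulating pass (all aces as 11) followed by an iterative downgrade loop; soft iff an ace survives at 11.
import Mathlib
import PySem

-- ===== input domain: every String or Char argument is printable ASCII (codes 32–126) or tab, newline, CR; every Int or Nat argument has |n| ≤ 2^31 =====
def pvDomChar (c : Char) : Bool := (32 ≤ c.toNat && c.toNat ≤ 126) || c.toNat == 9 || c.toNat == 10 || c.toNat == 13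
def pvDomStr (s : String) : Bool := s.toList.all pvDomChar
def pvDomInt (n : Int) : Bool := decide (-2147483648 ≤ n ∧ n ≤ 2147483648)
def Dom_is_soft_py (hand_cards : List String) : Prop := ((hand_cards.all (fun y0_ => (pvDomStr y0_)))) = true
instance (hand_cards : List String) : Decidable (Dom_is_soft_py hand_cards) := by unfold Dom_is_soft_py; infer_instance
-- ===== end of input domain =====

-- B replaces A's three list passes and closed-form ace arithmetic by one accumulating
-- pass (aces as 11) plus an iterative downgrade loop (objective: alternative).

-- ===== PORT A =====
-- Python's str(token)[0].upper() is a 1-char string; we carry it as a Char (exact on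
-- 1-char strings). The 'none' branch is Python's IndexError, excluded by Pre_.
def pvRankA (token : String) : Char :=
  match PySem.Str.pyGet? token 0 with
  | some c => PySem.Chars.upperChar c
  | none => ' '  -- unreachable under Pre_is_soft_py (IndexError in Python)

def pvValueA (r : Char) : Int :=
  if r = 'T' ∨ r = 'J' ∨ r = 'Q' ∨ r = 'K' then 10
  else if r = 'A' then 11
  else (PySem.Int.ofStr? (String.ofList [r])).getD 0  -- try int(rank) except: 0

def is_soft_py (hand_cards : List String) : Bool :=
  let ranks := hand_cards.map pvRankA
  let non_ace_total := ((ranks.filter (fun r => r ≠ 'A')).map pvValueA).sum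
  let ace_count : Int := ((ranks.filter (fun r => r = 'A')).map (fun _ => (1 : Int))).sum
  if ace_count = 0 then false
  else decide (non_ace_total + 11 + (ace_count - 1) ≤ 21)

-- ===== PORT B =====
def pvRankB (token : String) : Char :=
  match PySem.Str.pyGet? token 0 with
  | some c => PySem.Chars.upperChar c
  | none => ' '  -- unreachable under Pre_is_soft_py (IndexError in Python)

def pvValueB (r : Char) : Int :=
  if r = 'T' ∨ r = 'J' ∨ r = 'Q' ∨ r = 'K' then 10
  else (PySem.Int.ofStr? (String.ofList [r])).getD 0

-- while total > 21 and aces_as_eleven > 0: total -= 10; aces_as_eleven -= 1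
def pvDowngrade (total : Int) (aces : Int) : Int × Int :=
  if 21 < total ∧ 0 < aces then pvDowngrade (total - 10) (aces - 1) else (total, aces)
termination_by aces.toNat
decreasing_by omega

def is_soft_py_alt (hand_cards : List String) : Bool :=
  let st := hand_cards.foldl
    (fun (st : Int × Int) c =>
      let r := pvRankB c
      if r = 'A' then (st.1 + 11, st.2 + 1) else (st.1 + pvValueB r, st.2))
    (0, 0)
  let fin := pvDowngrade st.1 st.2
  decide (1 ≤ fin.2)

-- ===== PRECONDITION & SPEC =====
-- Pre_ excludes hands containing an empty card string, on which A raises IndexError.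
def Pre_is_soft_py (hand_cards : List String) : Prop := ∀ c ∈ hand_cards, c ≠ ""
instance (hand_cards : List String) : Decidable (Pre_is_soft_py hand_cards) := by
  unfold Pre_is_soft_py; infer_instance

def pvWitness_is_soft_py : List String := ["Ah", "7d"]

def Spec_is_soft_py (hand_cards : List String) (out : Bool) : Prop := out = is_soft_py_alt hand_cards
instance (hand_cards : List String) (out : Bool) : Decidable (Spec_is_soft_py hand_cards out) := by
  unfold Spec_is_soft_py; infer_instance

-- ===== CLAIM (what is proved, stated in full; the proofs are below) =====
def Claim_equal_is_soft_py : Prop := ∀ (hand_cards : List String), Dom_is_soft_py hand_cards → Pre_is_soft_py hand_cards → Spec_is_soft_py hand_cards (is_soft_py hand_cards)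

-- ===== LEMMAS AND PROOFS =====

theorem pvRankB_eq (t : String) : pvRankB t = pvRankA t := rfl

-- A's aggregates of a hand
def pvNonAce (hand : List String) : Int :=
  (((hand.map pvRankA).filter (fun r => r ≠ 'A')).map pvValueA).sum
def pvAces (hand : List String) : Int :=
  (((hand.map pvRankA).filter (fun r => r = 'A')).map (fun _ => (1 : Int))).sum

theorem pvAces_nonneg (hand : List String) : 0 ≤ pvAces hand := by
  induction hand with
  | nil => simp [pvAces]
  | cons c cs ih =>
    unfold pvAces at *
    simp only [List.map_cons, List.filter_cons]
    split
    · simp_all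
      omega
    · simp_all

theorem pvValueB_eq (r : Char) (h : r ≠ 'A') : pvValueB r = pvValueA r := by
  unfold pvValueA pvValueB
  split
  · simp
  · rfl

-- the fold accumulates exactly A's aggregates
theorem pvFold_eq (hand : List String) (t a : Int) :
    hand.foldl
      (fun (st : Int × Int) c =>
        let r := pvRankB c
        if r = 'A' then (st.1 + 11, st.2 + 1) else (st.1 + pvValueB r, st.2))
      (t, a) = (t + pvNonAce hand + 11 * pvAces hand, a + pvAces hand) := by
  induction hand generalizing t a with
  | nil => simp [pvNonAce, pvAces]
  | cons c cs ih =>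
    simp only [List.foldl_cons]
    by_cases h : pvRankB c = 'A'
    · rw [if_pos h, ih]
      have hA : pvRankA c = 'A' := by rw [← pvRankB_eq]; exact h
      unfold pvNonAce pvAces
      simp only [List.map_cons, List.filter_cons, hA]
      simp
      ring_nf
      exact ⟨trivial, trivial⟩
    · rw [if_neg h, ih]
      have hA : pvRankA c ≠ 'A' := by rw [← pvRankB_eq]; exact h
      unfold pvNonAce pvAces
      simp only [List.map_cons, List.filter_cons, hA]
      simp only [pvRankB_eq, pvValueB_eq _ hA]
      simp [hA]
      ring_nf

-- the downgrade loop keeps an ace at 11 iff the best soft total does not bust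
theorem pvDowngrade_soft (t a : Int) (ha : 0 ≤ a) :
    (1 ≤ (pvDowngrade t a).2) ↔ (1 ≤ a ∧ t - 10 * (a - 1) ≤ 21) := by
  fun_induction pvDowngrade t a with
  | case1 t a h ih =>
    rw [ih (by omega)]
    omega
  | case2 t a h =>
    simp only [not_and, not_lt] at h
    constructor
    · intro h1
      refine ⟨h1, ?_⟩
      by_cases ht : t ≤ 21
      · have h1' : 1 ≤ a := h1
        omega
      · have := h (by omega)
        have h1' : 1 ≤ a := h1
        omega
    · intro ⟨h1, _⟩; exact h1

-- the final comparison: A's closed form agrees with the downgrade-loop criterion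
theorem pvFinal (n a : Int) (ha : 0 ≤ a) :
    (if a = 0 then false else decide (n + 11 + (a - 1) ≤ 21))
      = decide (1 ≤ (pvDowngrade (0 + n + 11 * a) (0 + a)).2) := by
  have hd := pvDowngrade_soft (0 + n + 11 * a) (0 + a) (by omega)
  by_cases hz : a = 0
  · rw [if_pos hz]
    symm
    rw [decide_eq_false_iff_not, hd]
    omega
  · rw [if_neg hz, decide_eq_decide, hd]
    omega

-- ===== VERDICT (by name: the statement is the Claim_ definition above) =====
theorem is_soft_py_spec : Claim_equal_is_soft_py := by
  intro hand _ _
  unfold Spec_is_soft_py is_soft_py is_soft_py_alt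
  rw [pvFold_eq]
  exact pvFinal (pvNonAce hand) (pvAces hand) (pvAces_nonneg hand)
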